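-- pv_equiv track=rewrite | github.com/dudamarlena/pyc_source | pycfiles/pyni-0.0.8.tar/ruleparser.cpython-34.py | surround_previous_word
-- ===== SOURCE A (Python) =====
-- def surround_previous_word(input_str):
--     """
--     Surround last word in string with parentheses. If last non-whitespace character
--     is delimiter, do nothing
--     """
--     start = None
--     end = None
--     for i, char in enumerate(reversed(input_str)):
--         if start is None:
--             if char in '{}()[]<>?|':
--                 return input_str
--             if char != ' ':
--                 start = i
--         elif char in '{}()[]<>?| ':
--             end = i
--             break
--
--     if start is None:
--         return input_str
--     if end is None:
--         end = len(input_str)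
--     new_str = ''
--     for i, char in enumerate(reversed(input_str)):
--         if char == ' ' and i + 1 == start:
--             continue
--         if i == start:
--             new_str += ') '
--         elif i == end:
--             new_str += '('
--         new_str += char
--
--     if end == len(input_str):
--         new_str += '('
--     return new_str[::-1]
-- ===== SOURCE B (Python) =====
-- def surround_previous_word(input_str):
--     """
--     Surround last word in string with parentheses. If last non-whitespace character
--     is delimiter, do nothing
--     """
--     j = len(input_str)
--     while j > 0 and input_str[j - 1] == ' ':
--         j -= 1
--     if j == 0:
--         return input_str
--     if input_str[j - 1] in '{}()[]<>?|':
--         return input_str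
--     s = j
--     while s > 0 and input_str[s - 1] not in ' {}()[]<>?|':
--         s -= 1
--     return input_str[:s] + '(' + input_str[s:j] + ' )' + input_str[j + 1:]
-- ===== Notes on version B (the rewrite author's own statement) =====
-- stated objective: simpler
-- what changed: A makes two char-by-char passes over the reversed string (a state-machine scan finding the word boundaries, then a rebuild loop re-emitting every character with inserts and a skip, finally reversed); B finds the two boundaries with forward index scans from the right end and returns a single concatenation of three slices with the inserted parenthesis pieces.
import Mathlib
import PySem

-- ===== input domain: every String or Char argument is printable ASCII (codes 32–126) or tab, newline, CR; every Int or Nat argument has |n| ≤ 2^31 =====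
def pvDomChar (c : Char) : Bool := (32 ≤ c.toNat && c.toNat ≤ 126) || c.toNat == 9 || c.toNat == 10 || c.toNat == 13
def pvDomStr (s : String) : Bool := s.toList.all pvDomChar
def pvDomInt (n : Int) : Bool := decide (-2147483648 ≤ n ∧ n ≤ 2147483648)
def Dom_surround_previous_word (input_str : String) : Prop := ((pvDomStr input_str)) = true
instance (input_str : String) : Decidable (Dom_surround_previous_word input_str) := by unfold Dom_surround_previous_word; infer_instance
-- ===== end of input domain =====

-- B replaces A's two reversed enumerate-passes and char-by-char rebuild with two forward index scans and one slice concatenation (objective: simpler).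

-- B rewrites A's two reversed enumerate-passes as two forward index scans plus one slice concatenation (objective: simpler).

-- ===== PORT A =====
-- '{}()[]<>?|' and '{}()[]<>?| ' as character lists
def pvDelims : List Char := "{}()[]<>?|".toList

def pvDelims2 : List Char := "{}()[]<>?| ".toList

-- first loop of A: state = start (None | some index); result none = A's early return, some (start, end)
def pvLoop1 : List (Int × Char) → Option Int → Option (Option Int × Option Int)
  | [], start => some (start, none)
  | (i, c) :: rest, none =>
    if pvDelims.contains c then none
    else if c ≠ ' ' then pvLoop1 rest (some i)
    else pvLoop1 rest none
  | (i, c) :: rest, some s =>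
    if pvDelims2.contains c then some (some s, some i)
    else pvLoop1 rest (some s)

-- second loop of A: builds new_str (a list of chars, appended left-to-right as Python's += does)
def pvLoop2 (s e : Int) : List (Int × Char) → List Char → List Char
  | [], acc => acc
  | (i, c) :: rest, acc =>
    if c = ' ' ∧ i + 1 = s then pvLoop2 s e rest acc
    else
      let acc2 := if i = s then acc ++ [')', ' ']
        else if i = e then acc ++ ['('] else acc
      pvLoop2 s e rest (acc2 ++ [c])

def pvAcore (l : List Char) : List Char :=
  let r := l.reverse
  match pvLoop1 (PySem.List.enumerate r 0) none with
  | none => l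
  | some (none, _) => l
  | some (some s, e?) =>
    let e := e?.getD (l.length : Int)
    let acc := pvLoop2 s e (PySem.List.enumerate r 0) []
    let acc := if e = (l.length : Int) then acc ++ ['('] else acc
    acc.reverse

def surround_previous_word (input_str : String) : String :=
  String.ofList (pvAcore input_str.toList)

-- ===== PORT B =====
-- ' {}()[]<>?|' as a character list
def pvDelims2b : List Char := " {}()[]<>?|".toList

-- while j > 0 and input_str[j - 1] == ' ': j -= 1
def pvFindJ (l : List Char) : Nat → Nat
  | 0 => 0
  | j+1 => if l[j]? = some ' ' then pvFindJ l j else j+1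

-- while s > 0 and input_str[s - 1] not in ' {}()[]<>?|': s -= 1
def pvFindS (l : List Char) : Nat → Nat
  | 0 => 0
  | s+1 => match l[s]? with
    | some c => if pvDelims2b.contains c then s+1 else pvFindS l s
    | none => s+1

def pvBcore (l : List Char) : List Char :=
  let j := pvFindJ l l.length
  if j = 0 then l
  else if pvDelims.contains (l.getD (j-1) ' ') then l
  else
    let s := pvFindS l j
    l.take s ++ ['('] ++ ((l.drop s).take (j - s)) ++ [' ', ')'] ++ l.drop (j+1)

def surround_previous_word_alt (input_str : String) : String :=
  String.ofList (pvBcore input_str.toList)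

-- ===== PRECONDITION & SPEC =====
def Spec_surround_previous_word (input_str : String) (out : String) : Prop := out = surround_previous_word_alt input_str
instance (input_str : String) (out : String) : Decidable (Spec_surround_previous_word input_str out) := by unfold Spec_surround_previous_word; infer_instance

-- ===== CLAIM (what is proved, stated in full; the proofs are below) =====
def Claim_equal_surround_previous_word : Prop := ∀ (input_str : String), Dom_surround_previous_word input_str → Spec_surround_previous_word input_str (surround_previous_word input_str)

-- ===== LEMMAS AND PROOFS =====

theorem sp_nd : pvDelims.contains ' ' = false := by decide

theorem loop1_spaces (sp rest : List Char) (hsp : ∀ c ∈ sp, c = ' ') (n : Int) :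
    pvLoop1 (PySem.List.enumerate (sp ++ rest) n) none
      = pvLoop1 (PySem.List.enumerate rest (n + sp.length)) none := by
  induction sp generalizing n with
  | nil => simp
  | cons x xs ih =>
    have hx : x = ' ' := hsp x (by simp)
    subst hx
    rw [List.cons_append, PySem.List.enumerate_cons, pvLoop1, sp_nd]
    simp only [Bool.false_eq_true, if_false, ne_eq, not_true_eq_false]
    rw [ih (fun c hc => hsp c (by simp [hc]))]
    congr 2
    simp
    omega

theorem loop1_word (w p : List Char) (hw : ∀ c ∈ w, pvDelims2.contains c = false)
    (hp : p = [] ∨ ∃ d p', p = d :: p' ∧ pvDelims2.contains d = true) (n s : Int) :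
    pvLoop1 (PySem.List.enumerate (w ++ p) n) (some s)
      = some (some s, if p = [] then none else some (n + w.length)) := by
  induction w generalizing n with
  | nil =>
    rcases hp with h | ⟨d, p', rfl, hd⟩
    · subst h; simp [pvLoop1]
    · rw [List.nil_append, PySem.List.enumerate_cons, pvLoop1, hd]
      simp
  | cons x xs ih =>
    have hx := hw x (by simp)
    rw [List.cons_append, PySem.List.enumerate_cons, pvLoop1, hx]
    simp only [Bool.false_eq_true, if_false]
    rw [ih (fun c hc => hw c (by simp [hc]))]
    by_cases hpe : p = [] <;> simp [hpe]; ring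

theorem loop2_spaces (sp : List Char) (hsp : ∀ c ∈ sp, c = ' ') :
    ∀ (rest : List (Int × Char)) (n : Int) (acc : List Char) (s e : Int),
    s = n + sp.length → s < e →
    pvLoop2 s e (PySem.List.enumerate sp n ++ rest) acc
      = pvLoop2 s e rest (acc ++ List.replicate (sp.length - 1) ' ') := by
  induction sp with
  | nil => intro rest n acc s e hs he; simp
  | cons x xs ih =>
    intro rest n acc s e hs he
    have hx : x = ' ' := hsp x (by simp); subst hx
    rw [PySem.List.enumerate_cons, List.cons_append, pvLoop2]
    rcases xs with _ | ⟨y, ys⟩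
    · have : n + 1 = s := by simp at hs; omega
      simp [this]
    · have h1 : ¬ (' ' = ' ' ∧ n + 1 = s) := by
        rintro ⟨-, h⟩; simp at hs; omega
      have h2 : n ≠ s := by simp at hs; omega
      have h3 : n ≠ e := by simp at hs; omega
      rw [if_neg h1]
      simp only [if_neg h2, if_neg h3]
      rw [ih (fun c hc => hsp c (by simp [hc])) rest (n+1) (acc ++ [' ']) s e (by simp at hs ⊢; omega) he]
      congr 1
      simp [List.replicate_succ]

theorem loop2_plain (w : List Char) :
    ∀ (rest : List (Int × Char)) (n : Int) (acc : List Char) (s e : Int),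
    s < n → (∀ k : Nat, k < w.length → n + k ≠ e) →
    pvLoop2 s e (PySem.List.enumerate w n ++ rest) acc
      = pvLoop2 s e rest (acc ++ w) := by
  induction w with
  | nil => intro rest n acc s e _ _; simp
  | cons x xs ih =>
    intro rest n acc s e hs he
    rw [PySem.List.enumerate_cons, List.cons_append, pvLoop2]
    have h1 : ¬ (x = ' ' ∧ n + 1 = s) := by rintro ⟨-, h⟩; omega
    have h2 : n ≠ s := by omega
    have h3 : n ≠ e := by have := he 0 (by simp); simpa using this
    rw [if_neg h1]
    simp only [if_neg h2, if_neg h3]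
    rw [ih rest (n+1) (acc ++ [x]) s e (by omega)
        (fun k hk => by have := he (k+1) (by simp; omega); omega)]
    simp

theorem loop2_nil (s e : Int) (acc : List Char) : pvLoop2 s e [] acc = acc := rfl

theorem rev_decomp (sp w p : List Char) (c : Char) :
    (p.reverse ++ w.reverse ++ [c] ++ sp.reverse).reverse = sp ++ (c :: (w ++ p)) := by
  simp

theorem A_case3 (sp w p : List Char) (c : Char)
    (hsp : ∀ x ∈ sp, x = ' ') (hc1 : pvDelims.contains c = false) (hc2 : c ≠ ' ')
    (hw : ∀ x ∈ w, pvDelims2.contains x = false)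
    (hp : p = [] ∨ ∃ d p', p = d :: p' ∧ pvDelims2.contains d = true) :
    pvAcore (p.reverse ++ w.reverse ++ [c] ++ sp.reverse)
      = p.reverse ++ ['('] ++ w.reverse ++ [c, ' ', ')'] ++ List.replicate (sp.length - 1) ' ' := by
  set l : List Char := p.reverse ++ w.reverse ++ [c] ++ sp.reverse with hl
  have hr : l.reverse = sp ++ (c :: (w ++ p)) := rev_decomp sp w p c
  have hlen : (l.length : Int) = sp.length + 1 + w.length + p.length := by
    simp [hl]; push_cast; ring
  set S : Int := (sp.length : Int) with hS
  set E : Int := S + 1 + w.length with hE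
  -- first loop
  have h1 : pvLoop1 (PySem.List.enumerate l.reverse 0) none
      = some (some S, if p = [] then none else some E) := by
    rw [hr, loop1_spaces sp _ hsp 0, PySem.List.enumerate_cons, pvLoop1, hc1]
    simp only [Bool.false_eq_true, if_false, ne_eq, hc2, not_false_eq_true, if_true]
    rw [loop1_word w p hw hp]
    have e2 : (0 : Int) + ↑sp.length + 1 + ↑w.length = E := by rw [hE, hS]; ring
    have e1 : (0 : Int) + ↑sp.length = S := by rw [hS]; ring
    rw [e2, e1]
  -- value of e
  have he : (if p = [] then (none : Option Int) else some E).getD (l.length : Int) = E := by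
    rcases hp with hpe | ⟨d, p', rfl, -⟩
    · subst hpe
      have hv : (l.length : Int) = E := by rw [hlen, hE, hS]; simp
      simp [hv]
    · simp
  -- second loop
  have h2 : pvLoop2 S E (PySem.List.enumerate l.reverse 0) []
      = List.replicate (sp.length - 1) ' ' ++ [')', ' '] ++ [c] ++ w
        ++ (if p = [] then [] else ['('] ++ p) := by
    rw [hr, PySem.List.enumerate_append,
        loop2_spaces sp hsp _ 0 [] S E (by simp [hS]) (by rw [hE]; omega)]
    rw [PySem.List.enumerate_cons, pvLoop2]
    rw [if_neg (by rintro ⟨h, -⟩; exact hc2 h)]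
    have hiS : (0 : Int) + sp.length = S := by simp [hS]
    rw [if_pos hiS]
    rw [PySem.List.enumerate_append,
        loop2_plain w _ _ _ S E (by omega) (by intro k hk; rw [hE]; omega)]
    rcases hp with hpe | ⟨d, p', rfl, hd⟩
    · subst hpe
      simp [loop2_nil]
    · have hEn : 0 + ↑sp.length + 1 + (w.length : Int) = E := by rw [hE, hS]; ring
      rw [hEn, PySem.List.enumerate_cons, pvLoop2]
      rw [if_neg (by rintro ⟨-, h⟩; rw [hE] at h; omega)]
      rw [if_neg (by rw [hE]; omega), if_pos rfl]
      simp only [List.nil_append]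
      rw [← List.append_nil (PySem.List.enumerate p' (E + 1))]
      rw [loop2_plain p' [] (E+1) _ S E (by rw [hE]; omega)
          (by intro k hk; omega)]
      simp [loop2_nil]
  -- assemble
  show pvAcore l = _
  rw [pvAcore]
  simp only [h1, h2, he]
  rcases hp with hpe | ⟨d, p', rfl, hd⟩
  · subst hpe
    rw [if_pos (by rw [hlen, hE, hS]; push_cast; simp)]
    simp [List.reverse_replicate]
  · rw [if_neg (by rw [hlen, hE, hS]; push_cast; simp; omega)]
    simp [List.reverse_replicate]

theorem A_case1 (sp : List Char) (hsp : ∀ x ∈ sp, x = ' ') :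
    pvAcore sp.reverse = sp.reverse := by
  rw [pvAcore]
  have hr : (sp.reverse).reverse = sp ++ [] := by simp
  rw [hr, loop1_spaces sp [] hsp 0]
  rfl

theorem A_case2 (sp rest2 : List Char) (c : Char)
    (hsp : ∀ x ∈ sp, x = ' ') (hc : pvDelims.contains c = true) :
    pvAcore (rest2.reverse ++ [c] ++ sp.reverse) = rest2.reverse ++ [c] ++ sp.reverse := by
  rw [pvAcore]
  have hr : (rest2.reverse ++ [c] ++ sp.reverse).reverse = sp ++ (c :: rest2) := by simp
  rw [hr, loop1_spaces sp _ hsp 0, PySem.List.enumerate_cons, pvLoop1, hc]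
  rfl

theorem findJ_skip (l : List Char) (j : Nat) :
    ∀ k : Nat, (∀ m, m < k → l[j+m]? = some ' ') → pvFindJ l (j+k) = pvFindJ l j := by
  intro k
  induction k with
  | zero => intro _; rfl
  | succ k ih =>
    intro h
    have : j + (k+1) = (j+k) + 1 := by omega
    rw [this, pvFindJ, if_pos (h k (by omega))]
    exact ih (fun m hm => h m (by omega))

theorem findJ_stop (l : List Char) (j : Nat) (c : Char) (hc : l[j]? = some c) (h : c ≠ ' ') :
    pvFindJ l (j+1) = j+1 := by
  rw [pvFindJ, if_neg]
  simp [hc, h]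

theorem findS_skip (l : List Char) (j : Nat) :
    ∀ k : Nat, (∀ m, m < k → ∃ c, l[j+m]? = some c ∧ pvDelims2b.contains c = false) →
    pvFindS l (j+k) = pvFindS l j := by
  intro k
  induction k with
  | zero => intro _; rfl
  | succ k ih =>
    intro h
    obtain ⟨c, hc, hcf⟩ := h k (by omega)
    have : j + (k+1) = (j+k) + 1 := by omega
    rw [this, pvFindS, hc]
    simp only [hcf, Bool.false_eq_true, if_false]
    exact ih (fun m hm => h m (by omega))

theorem findS_stop (l : List Char) (j : Nat) (c : Char) (hc : l[j]? = some c)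
    (h : pvDelims2b.contains c = true) : pvFindS l (j+1) = j+1 := by
  rw [pvFindS, hc]
  show (if pvDelims2b.contains c = true then j + 1 else pvFindS l j) = j + 1
  rw [if_pos h]

theorem rev_sp_get (sp : List Char) (hsp : ∀ x ∈ sp, x = ' ') (k : Nat) (hk : k < sp.length) :
    sp.reverse[k]? = some ' ' := by
  have hk' : k < sp.reverse.length := by simpa using hk
  rw [List.getElem?_eq_getElem hk']
  have hmem : sp.reverse[k] ∈ sp := by
    have h2 := List.getElem_mem hk'
    simpa using h2
  rw [hsp _ hmem]

theorem findJ_main (m sp : List Char) (c : Char)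
    (hsp : ∀ x ∈ sp, x = ' ') (hc : c ≠ ' ') :
    pvFindJ (m ++ [c] ++ sp.reverse) ((m ++ [c] ++ sp.reverse).length) = m.length + 1 := by
  have hlen : (m ++ [c] ++ sp.reverse).length = (m.length + 1) + sp.length := by simp; omega
  rw [hlen, findJ_skip _ (m.length + 1) sp.length (by
    intro k hk
    have h1 : (m ++ [c] ++ sp.reverse)[m.length + 1 + k]? = sp.reverse[k]? := by
      rw [List.getElem?_append_right (by simp)]
      congr 1
      simp
    rw [h1, rev_sp_get sp hsp k hk])]
  exact findJ_stop _ m.length c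
    (by rw [List.append_assoc, List.getElem?_append_right (by omega)]; simp) hc

theorem B_case1 (sp : List Char) (hsp : ∀ x ∈ sp, x = ' ') :
    pvBcore sp.reverse = sp.reverse := by
  have hj : pvFindJ sp.reverse sp.length = 0 := by
    have h0 : sp.length = 0 + sp.length := by omega
    rw [h0, findJ_skip _ 0 sp.length (by
      intro k hk
      rw [Nat.zero_add, rev_sp_get sp hsp k hk])]
    rfl
  rw [pvBcore]
  simp [hj]

theorem B_case2 (sp rest2 : List Char) (c : Char)
    (hsp : ∀ x ∈ sp, x = ' ') (hc : pvDelims.contains c = true) :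
    pvBcore (rest2.reverse ++ [c] ++ sp.reverse) = rest2.reverse ++ [c] ++ sp.reverse := by
  have hc2 : c ≠ ' ' := by rintro rfl; rw [sp_nd] at hc; exact Bool.false_ne_true hc
  rw [pvBcore]
  rw [findJ_main _ sp c hsp hc2]
  have hg : (rest2.reverse ++ [c] ++ sp.reverse).getD (rest2.reverse.length + 1 - 1) ' ' = c := by
    rw [List.getD, List.append_assoc, Nat.add_sub_cancel,
        List.getElem?_append_right (by omega)]
    simp
  simp only [Nat.add_one_ne_zero, if_false, hg, hc, if_true]

theorem pvDelims2b_eq : ∀ c, pvDelims2b.contains c = pvDelims2.contains c := by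
  intro c
  rw [Bool.eq_iff_iff]
  show (' '::"{}()[]<>?|".toList).contains c = true ↔ ("{}()[]<>?|".toList ++ [' ']).contains c = true
  simp; tauto

theorem d2_split (c : Char) : pvDelims2.contains c = (pvDelims.contains c || (c == ' ')) := by
  rw [Bool.eq_iff_iff]
  show ("{}()[]<>?|".toList ++ [' ']).contains c = true ↔ _
  simp [pvDelims]; tauto

theorem B_case3 (sp w p : List Char) (c : Char)
    (hsp : ∀ x ∈ sp, x = ' ') (hc1 : pvDelims.contains c = false) (hc2 : c ≠ ' ')
    (hw : ∀ x ∈ w, pvDelims2.contains x = false)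
    (hp : p = [] ∨ ∃ d p', p = d :: p' ∧ pvDelims2.contains d = true) :
    pvBcore (p.reverse ++ w.reverse ++ [c] ++ sp.reverse)
      = p.reverse ++ ['('] ++ w.reverse ++ [c, ' ', ')'] ++ List.replicate (sp.length - 1) ' ' := by
  set m : List Char := p.reverse ++ w.reverse with hm
  set l : List Char := m ++ [c] ++ sp.reverse with hldef
  have hml : m.length = p.length + w.length := by simp [hm]
  show pvBcore l = _
  rw [pvBcore]
  have hj : pvFindJ l l.length = m.length + 1 := findJ_main m sp c hsp hc2
  have hg : l.getD (m.length + 1 - 1) ' ' = c := by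
    rw [List.getD, Nat.add_sub_cancel, hldef, List.append_assoc,
        List.getElem?_append_right (by omega)]
    simp
  have hnot2 : ∀ x, pvDelims.contains x = false → x ≠ ' ' → pvDelims2b.contains x = false := by
    intro x h1 h2
    rw [pvDelims2b_eq, d2_split, h1]
    simpa using h2
  have hs : pvFindS l (m.length + 1) = p.length := by
    have hstep : m.length + 1 = p.length + (w.length + 1) := by omega
    have harr : ∀ k : Nat, k < w.length + 1 →
        ∃ ch, l[p.length + k]? = some ch ∧ pvDelims2b.contains ch = false := by
      intro k hk
      have hlt : k < (w.reverse ++ [c]).length := by simp; omega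
      have hidx : l[p.length + k]? = (w.reverse ++ [c])[k]? := by
        have hl2 : l = p.reverse ++ ((w.reverse ++ [c]) ++ sp.reverse) := by
          rw [hldef, hm]; simp
        rw [hl2, List.getElem?_append_right (by simp),
            List.getElem?_append_left (by simpa using hlt)]
        congr 1
        simp
      refine ⟨(w.reverse ++ [c])[k]'hlt, by rw [hidx, List.getElem?_eq_getElem hlt], ?_⟩
      have hmem := List.getElem_mem hlt
      rcases List.mem_append.mp hmem with hmw | hmc
      · have hxw := hw _ (List.mem_reverse.mp hmw)
        have hne : (w.reverse ++ [c])[k]'hlt ≠ ' ' := by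
          intro hsp'
          rw [hsp', d2_split, sp_nd] at hxw
          simpa using hxw
        exact hnot2 _ (by rw [d2_split] at hxw; exact (Bool.or_eq_false_iff.mp hxw).1) hne
      · rw [List.mem_singleton.mp hmc]
        exact hnot2 c hc1 hc2
    rw [hstep, findS_skip l p.length (w.length + 1) harr]
    rcases hp with hpe | ⟨d, p', rfl, hd⟩
    · subst hpe; rfl
    · have hidx : l[p'.length]? = some d := by
        have hl2 : l = (p'.reverse ++ [d]) ++ (w.reverse ++ [c] ++ sp.reverse) := by
          rw [hldef, hm]; simp
        rw [hl2, List.getElem?_append_left (by simp),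
            List.getElem?_append_right (by simp)]
        simp
      show pvFindS l (p'.length + 1) = p'.length + 1
      exact findS_stop l p'.length d hidx (by rw [pvDelims2b_eq]; exact hd)
  rw [hj, hs, hg, hc1]
  simp only [Nat.add_one_ne_zero, if_false, Bool.false_eq_true]
  have ht1 : l.take p.length = p.reverse := by
    have hl2 : l = p.reverse ++ (w.reverse ++ ([c] ++ sp.reverse)) := by rw [hldef, hm]; simp
    rw [hl2, List.take_left' (by simp)]
  have ht2 : (l.drop p.length).take (m.length + 1 - p.length) = w.reverse ++ [c] := by
    have hl2 : l = p.reverse ++ ((w.reverse ++ [c]) ++ sp.reverse) := by rw [hldef, hm]; simp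
    rw [hl2, List.drop_left' (by simp)]
    have hn : m.length + 1 - p.length = (w.reverse ++ [c]).length := by simp; omega
    rw [hn, List.take_left' rfl]
  have ht3 : l.drop (m.length + 1 + 1) = List.replicate (sp.length - 1) ' ' := by
    have hsprep : sp = List.replicate sp.length ' ' := List.eq_replicate_of_mem hsp
    have h1 : m.length + 1 + 1 = (m ++ [c]).length + 1 := by simp
    rw [hldef, h1, ← List.drop_drop, List.drop_left]
    rw [hsprep, List.reverse_replicate, List.drop_replicate]
    simp
  rw [ht1, ht2, ht3]
  simp

theorem pv_main (l : List Char) : pvAcore l = pvBcore l := by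
  have hsplit : l.reverse.takeWhile (· == ' ') ++ l.reverse.dropWhile (· == ' ') = l.reverse :=
    List.takeWhile_append_dropWhile
  set sp := l.reverse.takeWhile (· == ' ') with hspdef
  set rest := l.reverse.dropWhile (· == ' ') with hrestdef
  have hsp : ∀ x ∈ sp, x = ' ' := by
    intro x hx
    have h2 := List.mem_takeWhile_imp hx
    simpa using h2
  have hl : l = rest.reverse ++ sp.reverse := by
    have h3 : (sp ++ rest).reverse = l := by rw [hsplit]; simp
    rw [← h3]; simp
  match hre : rest with
  | [] =>
    rw [hl]
    simp only [List.reverse_nil, List.nil_append]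
    rw [A_case1 sp hsp, B_case1 sp hsp]
  | c :: rest2 =>
    have hc2 : c ≠ ' ' := by
      have h4 := List.head?_dropWhile_not (p := (· == ' ')) (l := l.reverse)
      rw [← hrestdef] at h4
      simpa using h4
    have hlc : l = rest2.reverse ++ [c] ++ sp.reverse := by rw [hl]; simp
    by_cases hcd : pvDelims.contains c = true
    · rw [hlc, A_case2 sp rest2 c hsp hcd, B_case2 sp rest2 c hsp hcd]
    · have hc1 : pvDelims.contains c = false := by simpa using hcd
      set w := rest2.takeWhile (fun x => !pvDelims2.contains x) with hwdef
      set p := rest2.dropWhile (fun x => !pvDelims2.contains x) with hpdef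
      have hw : ∀ x ∈ w, pvDelims2.contains x = false := by
        intro x hx
        have h5 := List.mem_takeWhile_imp hx
        simpa using h5
      have hp : p = [] ∨ ∃ d p', p = d :: p' ∧ pvDelims2.contains d = true := by
        match hpe : p with
        | [] => exact Or.inl rfl
        | d :: p' =>
          refine Or.inr ⟨d, p', rfl, ?_⟩
          have h6 := List.head?_dropWhile_not (p := (fun x => !pvDelims2.contains x)) (l := rest2)
          rw [← hpdef] at h6
          simpa using h6
      have hrest2 : rest2 = w ++ p := List.takeWhile_append_dropWhile.symm
      have hl3 : l = p.reverse ++ w.reverse ++ [c] ++ sp.reverse := by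
        rw [hlc, hrest2]; simp
      rw [hl3, A_case3 sp w p c hsp hc1 hc2 hw hp, B_case3 sp w p c hsp hc1 hc2 hw hp]

-- ===== VERDICT (by name: the statement is the Claim_ definition above) =====
theorem surround_previous_word_spec : Claim_equal_surround_previous_word := by
  intro s _
  unfold Spec_surround_previous_word surround_previous_word surround_previous_word_alt
  rw [pv_main]
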